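-- pv_equiv track=rewrite | github.com/brunosmmm/autobrewpi | drivers/mcp23016.py | _byte_to_bool_list
-- ===== SOURCE A (Python) =====
-- def _byte_to_bool_list(byte):
--     bool_list = []
--     for i in range(0, 8):
--         if byte & (1<<i):
--             bool_list.append(True)
--         else:
--             bool_list.append(False)
--
--     return bool_list
-- ===== SOURCE B (Python) =====
-- def _byte_to_bool_list(byte):
--     s = format(byte & 0xFF, '08b')
--     return [c == '1' for c in s[::-1]]
-- ===== Notes on version B (the rewrite author's own statement) =====
-- stated objective: idiomatic
-- what changed: Replaces the eight-iteration bit-test-and-append loop with a single zero-padded binary formatting of the masked byte whose reversed characters give the LSB-first bool list.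
import Mathlib
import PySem

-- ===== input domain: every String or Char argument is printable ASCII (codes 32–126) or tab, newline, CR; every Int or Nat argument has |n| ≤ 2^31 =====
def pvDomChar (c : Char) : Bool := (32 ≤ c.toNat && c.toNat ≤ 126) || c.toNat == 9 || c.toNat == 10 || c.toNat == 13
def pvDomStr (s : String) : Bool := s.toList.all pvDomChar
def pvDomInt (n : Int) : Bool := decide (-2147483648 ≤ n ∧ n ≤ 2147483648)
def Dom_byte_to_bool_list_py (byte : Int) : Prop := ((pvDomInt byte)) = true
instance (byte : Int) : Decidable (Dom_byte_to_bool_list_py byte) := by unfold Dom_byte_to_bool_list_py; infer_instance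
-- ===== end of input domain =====

-- B replaces the 8-step bit-test loop by formatting the masked byte as an 8-char binary string and reading it reversed (idiomatic; same cost).

-- ===== PORT A =====
-- loop 'for i in range(0, 8): if byte & (1 << i): append True else append False'
-- (i ∈ [0,8) so i.toNat is exact for Python's 1 << i)
def byte_to_bool_list_py (byte : Int) : List Bool :=
  (PySem.List.pyRange 0 8 1).foldl
    (fun bool_list i =>
      if PySem.Int.band byte ((1 : Int) <<< i.toNat) ≠ 0 then bool_list ++ [true]
      else bool_list ++ [false])
    []

-- ===== PORT B =====
-- s = format(byte & 0xFF, '08b'); return [c == '1' for c in s[::-1]]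
-- format(m, '08b') for 0 ≤ m ≤ 255 is the 'b' digits of m zero-padded on the left to width 8 (exact on this range)
def byte_to_bool_list_py_alt (byte : Int) : List Bool :=
  let m := PySem.Int.band byte 255
  let digits := PySem.Int.toBinChars m
  let s := List.replicate (8 - digits.length) '0' ++ digits
  ((PySem.List.slice? s none none (-1)).getD []).map (fun c => c == '1')

-- ===== PRECONDITION & SPEC =====
def Spec_byte_to_bool_list_py (byte : Int) (out : List Bool) : Prop := out = byte_to_bool_list_py_alt byte
instance (byte : Int) (out : List Bool) : Decidable (Spec_byte_to_bool_list_py byte out) := by unfold Spec_byte_to_bool_list_py; infer_instance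

-- ===== CLAIM (what is proved, stated in full; the proofs are below) =====
def Claim_equal_byte_to_bool_list_py : Prop := ∀ (byte : Int), Dom_byte_to_bool_list_py byte → Spec_byte_to_bool_list_py byte (byte_to_bool_list_py byte)

-- ===== LEMMAS AND PROOFS =====

-- a low mask only sees the low 8 bits of the other operand
theorem pv_land_mod256 (c k : Nat) (hc : c < 256) : c &&& k = c &&& (k % 256) := by
  have h256 : (256 : Nat) = 2 ^ 8 := by norm_num
  apply Nat.eq_of_testBit_eq
  intro i
  rw [Nat.testBit_and, Nat.testBit_and, h256, Nat.testBit_mod_two_pow]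
  by_cases h : i < 8
  · simp [h]
  · have hcf : c.testBit i = false := by
      apply Nat.testBit_eq_false_of_lt
      calc c < 256 := hc
        _ = 2 ^ 8 := h256
        _ ≤ 2 ^ i := Nat.pow_le_pow_right (by norm_num) (by omega)
    simp [hcf]

-- 255 &&& r is the identity below 256, checked finitely
set_option maxRecDepth 4096 in
theorem pv_and_255 : ∀ r < 256, 255 &&& r = r := by decide

-- 255 - r is the bitwise complement of r on the low 8 bits, checked finitely
set_option maxRecDepth 8192 in
theorem pv_compl_testBit : ∀ r < 256, ∀ i < 8, (255 - r).testBit i = !r.testBit i := by decide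

-- PySem.Int.band with a single-bit mask 2^i (i < 8) only depends on the argument mod 256
theorem pv_band_emod_pow (a : Int) (i : Nat) (hi : i < 8) :
    PySem.Int.band a ((2 ^ i : Nat) : Int) = PySem.Int.band (a % 256) ((2 ^ i : Nat) : Int) := by
  have hp : 2 ^ i < 256 := by
    calc 2 ^ i ≤ 2 ^ 7 := Nat.pow_le_pow_right (by norm_num) (by omega)
      _ < 256 := by norm_num
  have hcn : (0 : Int) ≤ ((2 ^ i : Nat) : Int) := Int.natCast_nonneg _
  have hme : (0 : Int) ≤ a % 256 := Int.emod_nonneg a (by norm_num)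
  unfold PySem.Int.band
  by_cases ha : 0 ≤ a
  · rw [if_pos ha, if_pos hme, if_pos hcn, if_pos hcn]
    simp only [Int.toNat_natCast]
    have ht : (a % 256).toNat = a.toNat % 256 := by omega
    rw [ht, Nat.land_comm a.toNat _, Nat.land_comm (a.toNat % 256) _,
        ← pv_land_mod256 (2 ^ i) a.toNat hp]
  · rw [if_neg ha, if_pos hme, if_pos hcn, if_pos hcn]
    simp only [Int.toNat_natCast]
    have ht : (a % 256).toNat = 255 - (-a - 1).toNat % 256 := by omega
    have hr : (-a - 1).toNat % 256 < 256 := Nat.mod_lt _ (by norm_num)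
    rw [ht, pv_land_mod256 (2 ^ i) (-a - 1).toNat hp,
        Nat.and_two_pow (255 - (-a - 1).toNat % 256) i,
        pv_compl_testBit _ hr i hi,
        Nat.two_pow_and ((-a - 1).toNat % 256) i]
    cases ((-a - 1).toNat % 256).testBit i <;> simp

-- PySem.Int.band with the mask 255 only depends on the argument mod 256
theorem pv_band_emod_255 (a : Int) :
    PySem.Int.band a ((255 : Nat) : Int) = PySem.Int.band (a % 256) ((255 : Nat) : Int) := by
  have hcn : (0 : Int) ≤ ((255 : Nat) : Int) := Int.natCast_nonneg _
  have hme : (0 : Int) ≤ a % 256 := Int.emod_nonneg a (by norm_num)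
  unfold PySem.Int.band
  by_cases ha : 0 ≤ a
  · rw [if_pos ha, if_pos hme, if_pos hcn, if_pos hcn]
    simp only [Int.toNat_natCast]
    have ht : (a % 256).toNat = a.toNat % 256 := by omega
    rw [ht, Nat.land_comm a.toNat 255, Nat.land_comm (a.toNat % 256) 255,
        ← pv_land_mod256 255 a.toNat (by norm_num)]
  · rw [if_neg ha, if_pos hme, if_pos hcn, if_pos hcn]
    simp only [Int.toNat_natCast]
    have ht : (a % 256).toNat = 255 - (-a - 1).toNat % 256 := by omega
    have hr : (-a - 1).toNat % 256 < 256 := Nat.mod_lt _ (by norm_num)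
    rw [ht, pv_land_mod256 255 (-a - 1).toNat (by norm_num),
        pv_and_255 _ hr, Nat.land_comm (255 - (-a - 1).toNat % 256) 255,
        pv_and_255 (255 - (-a - 1).toNat % 256) (by omega)]

-- port A only depends on the argument mod 256
theorem pv_A_emod (a : Int) : byte_to_bool_list_py a = byte_to_bool_list_py (a % 256) := by
  unfold byte_to_bool_list_py
  apply PySem.List.foldl_congr_mem
  intro acc i hi
  have hm := PySem.List.mem_pyRange_one.mp hi
  rw [Int.one_shiftLeft i.toNat, pv_band_emod_pow a i.toNat (by omega)]

-- port B only depends on the argument mod 256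
theorem pv_B_emod (a : Int) : byte_to_bool_list_py_alt a = byte_to_bool_list_py_alt (a % 256) := by
  unfold byte_to_bool_list_py_alt
  have h255 : (255 : Int) = ((255 : Nat) : Int) := by norm_num
  rw [h255, pv_band_emod_255 a]

-- the two ports agree on every residue 0 … 255
set_option maxRecDepth 8192 in
set_option maxHeartbeats 1000000 in
theorem pv_small : ∀ m : Fin 256, byte_to_bool_list_py (m.1 : Int) = byte_to_bool_list_py_alt (m.1 : Int) := by decide

-- ===== VERDICT (by name: the statement is the Claim_ definition above) =====
theorem byte_to_bool_list_py_spec : Claim_equal_byte_to_bool_list_py := by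
  intro a _
  unfold Spec_byte_to_bool_list_py
  have hlt : (a % 256).toNat < 256 := by omega
  rw [pv_A_emod a, pv_B_emod a, show a % 256 = (((a % 256).toNat : Nat) : Int) from by omega]
  exact pv_small ⟨_, hlt⟩
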